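-- pv_equiv track=rewrite | github.com/Nghia03092004/nghia03092004.github.io | project_euler/problem_842/solution.py | lcg_value_at
-- ===== SOURCE A (Python) =====
-- def lcg_value_at(a, c, m, x0, n):
--     """Compute x_n using matrix exponentiation: [a c; 0 1]^n * [x0; 1]."""
--     def mat_mul(A, B, mod):
--         return [
--             [(A[0][0]*B[0][0] + A[0][1]*B[1][0]) % mod,
--              (A[0][0]*B[0][1] + A[0][1]*B[1][1]) % mod],
--             [(A[1][0]*B[0][0] + A[1][1]*B[1][0]) % mod,
--              (A[1][0]*B[0][1] + A[1][1]*B[1][1]) % mod]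
--         ]
--
--     def mat_pow(M, p, mod):
--         result = [[1, 0], [0, 1]]  # identity
--         while p > 0:
--             if p & 1:
--                 result = mat_mul(result, M, mod)
--             M = mat_mul(M, M, mod)
--             p >>= 1
--         return result
--
--     M = [[a, c], [0, 1]]
--     Mn = mat_pow(M, n, m)
--     return (Mn[0][0] * x0 + Mn[0][1]) % m
-- ===== SOURCE B (Python) =====
-- def lcg_value_at(a, c, m, x0, n):
--     """Closed form x_n = a^n*x0 + c*(1 + a + ... + a^(n-1)) mod m, computed by a
--     log-depth divide-and-conquer on the pair (a^k mod m, geometric sum mod m)."""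
--     if n <= 0:
--         return x0 % m
--     an, s = _geom(a, n, m)
--     return (an * x0 + c * s) % m
--
--
-- def _geom(a, k, m):
--     """Return (a**k % m, (1 + a + ... + a**(k-1)) % m) without any division."""
--     if k == 0:
--         return (1 % m, 0)
--     if k % 2 == 1:
--         p, s = _geom(a, k - 1, m)
--         return (a * p % m, (a * s + 1) % m)
--     h, sh = _geom(a, k // 2, m)
--     return (h * h % m, sh * (1 + h) % m)
-- ===== Notes on version B (the rewrite author's own statement) =====
-- stated objective: simpler
-- what changed: Replaces the 2x2 matrix binary exponentiation with a scalar divide-and-conquer that returns the pair (a^n mod m, geometric sum 1+a+...+a^(n-1) mod m) and combines them in the closed form (a^n*x0 + c*S) % m.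
import Mathlib
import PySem

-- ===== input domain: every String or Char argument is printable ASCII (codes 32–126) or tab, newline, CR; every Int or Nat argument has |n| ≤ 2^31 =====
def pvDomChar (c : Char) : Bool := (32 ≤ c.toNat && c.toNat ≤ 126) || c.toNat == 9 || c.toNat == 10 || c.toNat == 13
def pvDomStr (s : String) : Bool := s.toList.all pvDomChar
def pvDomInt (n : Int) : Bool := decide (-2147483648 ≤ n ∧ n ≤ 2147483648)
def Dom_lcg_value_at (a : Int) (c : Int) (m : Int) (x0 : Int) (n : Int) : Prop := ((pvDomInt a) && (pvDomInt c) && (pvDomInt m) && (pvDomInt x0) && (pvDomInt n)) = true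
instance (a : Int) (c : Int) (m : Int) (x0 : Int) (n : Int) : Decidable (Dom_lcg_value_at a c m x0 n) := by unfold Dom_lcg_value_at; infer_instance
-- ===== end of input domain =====

-- B replaces A's 2x2 matrix binary exponentiation with a scalar divide-and-conquer on
-- (a^k mod m, geometric sum mod m) combined in closed form (simpler; same O(log n) cost).

-- ===== PORT A =====
-- a 2x2 matrix [[p,q],[r,s]] is the tuple ((p,q),(r,s))
def pvMatMul (A B : (Int × Int) × (Int × Int)) (mod : Int) : (Int × Int) × (Int × Int) :=
  ((PySem.Int.mod (A.1.1 * B.1.1 + A.1.2 * B.2.1) mod,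
    PySem.Int.mod (A.1.1 * B.1.2 + A.1.2 * B.2.2) mod),
   (PySem.Int.mod (A.2.1 * B.1.1 + A.2.2 * B.2.1) mod,
    PySem.Int.mod (A.2.1 * B.1.2 + A.2.2 * B.2.2) mod))

-- the 'while p > 0' loop of mat_pow; p & 1 = p % 2 and p >> 1 = p / 2 for p ≥ 0
def pvMatPowAux (result M : (Int × Int) × (Int × Int)) (p : Nat) (mod : Int) :
    (Int × Int) × (Int × Int) :=
  if p = 0 then result
  else
    pvMatPowAux (if p % 2 = 1 then pvMatMul result M mod else result) (pvMatMul M M mod)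
      (p / 2) mod
termination_by p
decreasing_by omega

def pvMatPow (M : (Int × Int) × (Int × Int)) (p : Int) (mod : Int) :
    (Int × Int) × (Int × Int) :=
  pvMatPowAux ((1, 0), (0, 1)) M p.toNat mod   -- p ≤ 0: the loop body never runs

def lcg_value_at (a : Int) (c : Int) (m : Int) (x0 : Int) (n : Int) : Int :=
  let Mn := pvMatPow ((a, c), (0, 1)) n m
  PySem.Int.mod (Mn.1.1 * x0 + Mn.1.2) m

-- ===== PORT B =====
-- _geom of Source B: (a**k % m, (1 + a + ... + a**(k-1)) % m)
def pvGeom (a : Int) (k : Nat) (m : Int) : Int × Int :=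
  if k = 0 then (PySem.Int.mod 1 m, 0)
  else if k % 2 = 1 then
    let ps := pvGeom a (k - 1) m
    (PySem.Int.mod (a * ps.1) m, PySem.Int.mod (a * ps.2 + 1) m)
  else
    let hs := pvGeom a (k / 2) m
    (PySem.Int.mod (hs.1 * hs.1) m, PySem.Int.mod (hs.2 * (1 + hs.1)) m)
termination_by k
decreasing_by all_goals omega

def lcg_value_at_alt (a : Int) (c : Int) (m : Int) (x0 : Int) (n : Int) : Int :=
  if n ≤ 0 then PySem.Int.mod x0 m
  else
    let ans := pvGeom a n.toNat m
    PySem.Int.mod (ans.1 * x0 + c * ans.2) m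

-- ===== PRECONDITION & SPEC =====
-- Pre_ excludes exactly m = 0, where Python's '%' raises ZeroDivisionError in A (and in B).
def Pre_lcg_value_at (a : Int) (c : Int) (m : Int) (x0 : Int) (n : Int) : Prop := m ≠ 0
instance (a : Int) (c : Int) (m : Int) (x0 : Int) (n : Int) : Decidable (Pre_lcg_value_at a c m x0 n) := by unfold Pre_lcg_value_at; infer_instance

def pvWitness_lcg_value_at : Int × Int × Int × Int × Int := (7, 3, 10, 5, 6)

def Spec_lcg_value_at (a : Int) (c : Int) (m : Int) (x0 : Int) (n : Int) (out : Int) : Prop := out = lcg_value_at_alt a c m x0 n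
instance (a : Int) (c : Int) (m : Int) (x0 : Int) (n : Int) (out : Int) : Decidable (Spec_lcg_value_at a c m x0 n out) := by unfold Spec_lcg_value_at; infer_instance

-- ===== CLAIM (what is proved, stated in full; the proofs are below) =====
def Claim_equal_lcg_value_at : Prop := ∀ (a : Int) (c : Int) (m : Int) (x0 : Int) (n : Int), Dom_lcg_value_at a c m x0 n → Pre_lcg_value_at a c m x0 n → Spec_lcg_value_at a c m x0 n (lcg_value_at a c m x0 n)

-- ===== LEMMAS AND PROOFS =====

-- Python '%' respects congruence mod m
theorem pvMod_modEq (m x : Int) : PySem.Int.mod x m ≡ x [ZMOD m] := by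
  have h := PySem.Int.floordiv_mul_add_mod x m
  exact Int.modEq_iff_dvd.mpr
    ⟨PySem.Int.floordiv x m, by rw [mul_comm]; linarith⟩

theorem pvMod_congr (m x y : Int) (hm : m ≠ 0) (h : x ≡ y [ZMOD m]) :
    PySem.Int.mod x m = PySem.Int.mod y m := by
  have hd : m ∣ (PySem.Int.mod y m - PySem.Int.mod x m) :=
    Int.ModEq.dvd (((pvMod_modEq m x).trans h).trans (pvMod_modEq m y).symm)
  obtain ⟨k, hk⟩ := hd
  rcases lt_or_gt_of_ne hm with hneg | hpos
  · have b1 := PySem.Int.mod_neg_bounds x hneg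
    have b2 := PySem.Int.mod_neg_bounds y hneg
    have hk0 : k = 0 := by nlinarith [b1.1, b1.2, b2.1, b2.2]
    rw [hk0, mul_zero] at hk; linarith
  · have b1n := PySem.Int.mod_nonneg x hpos
    have b1l := PySem.Int.mod_lt x hpos
    have b2n := PySem.Int.mod_nonneg y hpos
    have b2l := PySem.Int.mod_lt y hpos
    have hk0 : k = 0 := by nlinarith
    rw [hk0, mul_zero] at hk; linarith

-- pure geometric sum: gsum a k = 1 + a + ... + a^(k-1)
def gsum (a : Int) : Nat → Int
  | 0 => 0
  | k + 1 => 1 + a * gsum a k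

theorem gsum_succ' (a : Int) (k : Nat) : gsum a (k + 1) = gsum a k + a ^ k := by
  induction k with
  | zero => simp [gsum]
  | succ j ih =>
    have h1 : gsum a (j + 1 + 1) = 1 + a * gsum a (j + 1) := rfl
    have h2 : gsum a (j + 1) = 1 + a * gsum a j := rfl
    have he : 1 + a * gsum a j = gsum a j + a ^ j := h2.symm.trans ih
    rw [h1, ih, pow_succ]; linear_combination he

theorem gsum_two_mul (a : Int) (j : Nat) :
    gsum a (2 * j) = gsum a j * (1 + a ^ j) := by
  induction j with
  | zero => simp [gsum]
  | succ j ih =>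
    have he : (1 : Int) + a * gsum a j = gsum a j + a ^ j := gsum_succ' a j
    have h1 : gsum a (2 * (j + 1)) = 1 + a * (1 + a * gsum a (2 * j)) := by
      rw [show 2 * (j + 1) = (2 * j + 1) + 1 by ring]; rfl
    have h2 : gsum a (j + 1) = 1 + a * gsum a j := rfl
    rw [h1, ih, h2, pow_succ]
    linear_combination a * he

-- pvGeom computes (a^k, gsum a k) modulo m
theorem pvGeom_spec (a : Int) (m : Int) (k : Nat) :
    (pvGeom a k m).1 ≡ a ^ k [ZMOD m] ∧ (pvGeom a k m).2 ≡ gsum a k [ZMOD m] := by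
  induction k using Nat.strong_induction_on with
  | _ k ih =>
    rw [pvGeom]
    by_cases h0 : k = 0
    · subst h0; simp [gsum]; exact pvMod_modEq m 1
    · by_cases hodd : k % 2 = 1
      · simp only [h0, if_false, hodd, if_true]
        obtain ⟨ihp, ihs⟩ := ih (k - 1) (by omega)
        have hk : k - 1 + 1 = k := by omega
        constructor
        · refine (pvMod_modEq m _).trans ?_
          calc a * (pvGeom a (k - 1) m).1 ≡ a * a ^ (k - 1) [ZMOD m] :=
                Int.ModEq.mul_left a ihp
            _ = a ^ k := by rw [← pow_succ', hk]
        · refine (pvMod_modEq m _).trans ?_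
          have : a * (pvGeom a (k - 1) m).2 + 1 ≡ a * gsum a (k - 1) + 1 [ZMOD m] :=
            Int.ModEq.add_right 1 (Int.ModEq.mul_left a ihs)
          refine this.trans ?_
          rw [show a * gsum a (k - 1) + 1 = gsum a (k - 1 + 1) by rw [gsum]; ring, hk]
      · simp only [h0, if_false, hodd, if_false]
        obtain ⟨ihp, ihs⟩ := ih (k / 2) (by omega)
        have hk : 2 * (k / 2) = k := by omega
        constructor
        · refine (pvMod_modEq m _).trans ?_
          calc (pvGeom a (k / 2) m).1 * (pvGeom a (k / 2) m).1
              ≡ a ^ (k / 2) * a ^ (k / 2) [ZMOD m] := Int.ModEq.mul ihp ihp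
            _ = a ^ k := by rw [← pow_add]; congr 1; omega
        · refine (pvMod_modEq m _).trans ?_
          calc (pvGeom a (k / 2) m).2 * (1 + (pvGeom a (k / 2) m).1)
              ≡ gsum a (k / 2) * (1 + a ^ (k / 2)) [ZMOD m] :=
                Int.ModEq.mul ihs (Int.ModEq.add_left 1 ihp)
            _ = gsum a k := by rw [← gsum_two_mul, hk]

-- pure shadow of A's matrices: an affine map x ↦ p*x + q as the pair (p, q)
def amul (P Q : Int × Int) : Int × Int := (P.1 * Q.1, P.1 * Q.2 + P.2)

def apowN (M : Int × Int) : Nat → Int × Int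
  | 0 => (1, 0)
  | k + 1 => amul M (apowN M k)

theorem amul_assoc (P Q R : Int × Int) : amul (amul P Q) R = amul P (amul Q R) := by
  simp [amul]; ring_nf; simp

theorem apowN_sq (M : Int × Int) (j : Nat) :
    apowN (amul M M) j = apowN M (2 * j) := by
  induction j with
  | zero => rfl
  | succ j ih =>
    have h1 : apowN (amul M M) (j + 1) = amul (amul M M) (apowN (amul M M) j) := rfl
    rw [h1, ih, show 2 * (j + 1) = (2 * j) + 1 + 1 by ring]
    have h2 : apowN M (2 * j + 1 + 1) = amul M (apowN M (2 * j + 1)) := rfl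
    have h3 : apowN M (2 * j + 1) = amul M (apowN M (2 * j)) := rfl
    rw [h2, h3, ← amul_assoc]

-- congruence between A's matrices (bottom row ≡ (0,1)) and the affine shadow
def MC (m : Int) (A : (Int × Int) × (Int × Int)) (P : Int × Int) : Prop :=
  A.1.1 ≡ P.1 [ZMOD m] ∧ A.1.2 ≡ P.2 [ZMOD m] ∧ A.2.1 ≡ 0 [ZMOD m] ∧ A.2.2 ≡ 1 [ZMOD m]

theorem pvMatMul_cong {m : Int} {A B : (Int × Int) × (Int × Int)} {P Q : Int × Int}
    (hA : MC m A P) (hB : MC m B Q) : MC m (pvMatMul A B m) (amul P Q) := by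
  obtain ⟨a00, a01, a10, a11⟩ := hA
  obtain ⟨b00, b01, b10, b11⟩ := hB
  refine ⟨(pvMod_modEq m _).trans ?_, (pvMod_modEq m _).trans ?_,
          (pvMod_modEq m _).trans ?_, (pvMod_modEq m _).trans ?_⟩
  · calc A.1.1 * B.1.1 + A.1.2 * B.2.1 ≡ P.1 * Q.1 + P.2 * 0 [ZMOD m] :=
        Int.ModEq.add (Int.ModEq.mul a00 b00) (Int.ModEq.mul a01 b10)
      _ = (amul P Q).1 := by simp [amul]
  · calc A.1.1 * B.1.2 + A.1.2 * B.2.2 ≡ P.1 * Q.2 + P.2 * 1 [ZMOD m] :=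
        Int.ModEq.add (Int.ModEq.mul a00 b01) (Int.ModEq.mul a01 b11)
      _ = (amul P Q).2 := by simp [amul]
  · calc A.2.1 * B.1.1 + A.2.2 * B.2.1 ≡ 0 * Q.1 + 1 * 0 [ZMOD m] :=
        Int.ModEq.add (Int.ModEq.mul a10 b00) (Int.ModEq.mul a11 b10)
      _ = 0 := by ring
  · calc A.2.1 * B.1.2 + A.2.2 * B.2.2 ≡ 0 * Q.2 + 1 * 1 [ZMOD m] :=
        Int.ModEq.add (Int.ModEq.mul a10 b01) (Int.ModEq.mul a11 b11)
      _ = 1 := by ring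

-- the pure mirror of A's loop
def aLoop (R M : Int × Int) (p : Nat) : Int × Int :=
  if p = 0 then R
  else aLoop (if p % 2 = 1 then amul R M else R) (amul M M) (p / 2)
termination_by p
decreasing_by omega

theorem pvMatPowAux_cong (m : Int) :
    ∀ (p : Nat) (R M : (Int × Int) × (Int × Int)) (R' M' : Int × Int),
      MC m R R' → MC m M M' → MC m (pvMatPowAux R M p m) (aLoop R' M' p) := by
  intro p
  induction p using Nat.strong_induction_on with
  | _ p ih =>
    intro R M R' M' hR hM
    rw [pvMatPowAux, aLoop]
    by_cases h0 : p = 0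
    · simpa [h0] using hR
    · simp only [h0, if_false]
      refine ih (p / 2) (by omega) _ _ _ _ ?_ (pvMatMul_cong hM hM)
      by_cases hodd : p % 2 = 1
      · simpa [hodd] using pvMatMul_cong hR hM
      · simpa [hodd] using hR

theorem aLoop_spec : ∀ (p : Nat) (R M : Int × Int), aLoop R M p = amul R (apowN M p) := by
  intro p
  induction p using Nat.strong_induction_on with
  | _ p ih =>
    intro R M
    rw [aLoop]
    by_cases h0 : p = 0
    · simp [h0, apowN, amul]
    · simp only [h0, if_false]
      rw [ih (p / 2) (by omega), apowN_sq]
      by_cases hodd : p % 2 = 1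
      · rw [if_pos hodd, show p = 2 * (p / 2) + 1 by omega]
        rw [show 2 * ((2 * (p / 2) + 1) / 2) = 2 * (p / 2) by omega]
        have h1 : apowN M (2 * (p / 2) + 1) = amul M (apowN M (2 * (p / 2))) := rfl
        rw [h1, ← amul_assoc]
      · rw [if_neg hodd, show 2 * (p / 2) = p by omega]

theorem apowN_ac (a c : Int) (k : Nat) : apowN (a, c) k = (a ^ k, c * gsum a k) := by
  induction k with
  | zero => simp [apowN, gsum]
  | succ j ih =>
    have h1 : apowN (a, c) (j + 1) = amul (a, c) (apowN (a, c) j) := rfl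
    have h2 : gsum a (j + 1) = 1 + a * gsum a j := rfl
    rw [h1, ih, amul, h2, pow_succ']; ring_nf

-- A's top-row entries are (a^N, c * gsum a N) mod m, with N = n.toNat
theorem lcg_A_eq (a c m x0 n : Int) (hm : m ≠ 0) :
    lcg_value_at a c m x0 n =
      PySem.Int.mod (a ^ n.toNat * x0 + c * gsum a n.toNat) m := by
  have hI : MC m ((1, 0), (0, 1)) (1, 0) :=
    ⟨Int.ModEq.refl _, Int.ModEq.refl _, Int.ModEq.refl _, Int.ModEq.refl _⟩
  have hM : MC m ((a, c), (0, 1)) (a, c) :=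
    ⟨Int.ModEq.refl _, Int.ModEq.refl _, Int.ModEq.refl _, Int.ModEq.refl _⟩
  have h := pvMatPowAux_cong m n.toNat ((1, 0), (0, 1)) ((a, c), (0, 1)) (1, 0) (a, c) hI hM
  rw [aLoop_spec, apowN_ac] at h
  obtain ⟨h00, h01, -, -⟩ := h
  simp only [amul] at h00 h01
  unfold lcg_value_at pvMatPow
  exact pvMod_congr m _ _ hm
    (Int.ModEq.add (Int.ModEq.mul (by simpa using h00) (Int.ModEq.refl x0))
      (by simpa using h01))

-- ===== VERDICT (by name: the statement is the Claim_ definition above) =====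
theorem lcg_value_at_spec : Claim_equal_lcg_value_at := by
  intro a c m x0 n _ hm
  unfold Spec_lcg_value_at
  rw [lcg_A_eq a c m x0 n hm]
  unfold lcg_value_at_alt
  by_cases hn : n ≤ 0
  · rw [if_pos hn]
    have : n.toNat = 0 := by omega
    rw [this]
    simp [gsum]
  · rw [if_neg hn]
    obtain ⟨hp, hs⟩ := pvGeom_spec a m n.toNat
    exact (pvMod_congr m _ _ hm
      (Int.ModEq.add (Int.ModEq.mul hp (Int.ModEq.refl x0)) (Int.ModEq.mul_left c hs))).symm
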